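-- pv_equiv track=rewrite | github.com/matteo-flores/architetchures-for-code-developement-llm4se | code/task25_2.py | range_add_range_sum
-- ===== SOURCE A (Python) =====
-- from typing import List
--
-- def range_add_range_sum(n: int, queries: List[tuple]) -> List[int]:
--     """Processes range add and range sum queries on an array of size n using a segment tree.
--
--     Args:
--         n: The size of the array.
--         queries: A list of queries. Each query is a list:
--             - [0, s, t, x]: Add x to all elements in the range [s, t].
--             - [1, s, t]: Query the sum of elements in the range [s, t].
--
--     Returns:
--         A list of results for all range sum queries.
--     """
--     tree_size = 4 * n
--     tree_sum = [0] * tree_size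
--     lazy = [0] * tree_size
--
--     def push_down(node, start, end):
--         if lazy[node] != 0:
--             tree_sum[node] += lazy[node] * (end - start + 1)
--             if start != end:
--                 lazy[2 * node] += lazy[node]
--                 lazy[2 * node + 1] += lazy[node]
--             lazy[node] = 0
--
--     def push_up(node, start, end):
--         if start != end:
--             tree_sum[node] = tree_sum[2 * node] + tree_sum[2 * node + 1]
--
--     def update_range(node, start, end, l, r, val):
--         push_down(node, start, end)
--         if start > end or start > r or end < l:
--             return
--         if l <= start and end <= r:
--             lazy[node] += val
--             push_down(node, start, end)
--             return
--         mid = (start + end) // 2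
--         update_range(2 * node, start, mid, l, r, val)
--         update_range(2 * node + 1, mid + 1, end, l, r, val)
--         push_up(node, start, end)
--
--     def query_sum(node, start, end, l, r):
--         if start > end or start > r or end < l:
--             return 0
--         push_down(node, start, end)
--         if l <= start and end <= r:
--             return tree_sum[node]
--         mid = (start + end) // 2
--         p1 = query_sum(2 * node, start, mid, l, r)
--         p2 = query_sum(2 * node + 1, mid + 1, end, l, r)
--         return p1 + p2
--
--     results = []
--     for query in queries:
--         if query[0] == 0:
--             _, s, t, x = query
--             update_range(1, 1, n, s, t, x)
--         else:
--             _, s, t = query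
--             results.append(query_sum(1, 1, n, s, t))
--     return results
-- ===== SOURCE B (Python) =====
-- from typing import List
--
-- def range_add_range_sum(n: int, queries: List[tuple]) -> List[int]:
--     """Answers each range-sum query directly from the list of past range-adds:
--     the sum over [s,t] is the sum over past adds (a,b,x) of x times the length
--     of the overlap of [a,b], [s,t] and [1,n].  No tree is built."""
--     adds = []
--     results = []
--     for query in queries:
--         if query[0] == 0:
--             _, s, t, x = query
--             adds.append((s, t, x))
--         else:
--             _, s, t = query
--             lo = max(s, 1)
--             hi = min(t, n)
--             total = 0
--             for (a, b, x) in adds: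
--                 length = min(b, hi) - max(a, lo) + 1
--                 if length > 0:
--                     total += x * length
--             results.append(total)
--     return results
-- ===== Notes on version B (the rewrite author's own statement) =====
-- stated objective: simpler
-- what changed: Replaces the lazy segment tree (4n-node arrays, recursive push_down/push_up update and query) by a flat list of past range-add operations; each sum query is answered directly as the sum over past adds of x times the length of the interval overlap with the query range clamped to [1,n].
import Mathlib
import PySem

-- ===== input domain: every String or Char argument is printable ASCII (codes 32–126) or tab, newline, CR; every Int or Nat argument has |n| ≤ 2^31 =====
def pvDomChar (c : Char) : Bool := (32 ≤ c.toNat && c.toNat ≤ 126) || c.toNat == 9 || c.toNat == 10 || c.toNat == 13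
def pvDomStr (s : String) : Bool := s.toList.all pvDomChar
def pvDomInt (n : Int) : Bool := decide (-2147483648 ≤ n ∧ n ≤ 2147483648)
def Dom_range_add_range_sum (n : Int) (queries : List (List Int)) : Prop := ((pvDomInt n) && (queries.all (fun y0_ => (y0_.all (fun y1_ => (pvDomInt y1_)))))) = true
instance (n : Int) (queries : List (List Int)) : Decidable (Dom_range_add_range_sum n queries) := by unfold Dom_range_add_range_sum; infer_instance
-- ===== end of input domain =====

-- B replaces A's lazy segment tree by a plain list of past range-adds, answering each
-- sum query as a sum of interval overlaps (objective: simpler; no speed claim).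

-- ===== PORT A =====
-- Python's `tree_sum` / `lazy` lists (length 4n) are modeled as total functions Nat → Int;
-- this is exact on Pre_: there the node indices A touches stay inside [1, 4n).
-- Python's `(start + end) // 2`:
def pvMid (s e : Int) : Int := PySem.Int.floordiv (s + e) 2

-- push_down
def pvPushDown (T L : Nat → Int) (node : Nat) (s e : Int) : (Nat → Int) × (Nat → Int) :=
  if L node ≠ 0 then
    let Ln := L node
    let T' : Nat → Int := fun m => if m = node then T m + Ln * (e - s + 1) else T m
    if s ≠ e then
      (T', fun m => if m = node then 0 else if m = 2 * node ∨ m = 2 * node + 1 then L m + Ln else L m)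
    else
      (T', fun m => if m = node then 0 else L m)
  else (T, L)

-- update_range (returns the mutated arrays); the Nat fuel only bounds the recursion
-- depth to make it structural (fuel (e-s).toNat+1 always suffices, see pvUpdate_spec)
def pvUpdateF : Nat → (Nat → Int) → (Nat → Int) → Nat → Int → Int → Int → Int → Int → (Nat → Int) × (Nat → Int)
  | 0, T, L, _, _, _, _, _, _ => (T, L)
  | fuel + 1, T, L, node, s, e, l, r, v =>
    let P := pvPushDown T L node s e
    if s > e ∨ s > r ∨ e < l then P
    else if l ≤ s ∧ e ≤ r then
      pvPushDown P.1 (fun m => if m = node then P.2 m + v else P.2 m) node s e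
    else
      let Q := pvUpdateF fuel P.1 P.2 (2 * node) s (pvMid s e) l r v
      let R := pvUpdateF fuel Q.1 Q.2 (2 * node + 1) (pvMid s e + 1) e l r v
      -- push_up
      (if s ≠ e then (fun m => if m = node then R.1 (2 * node) + R.1 (2 * node + 1) else R.1 m) else R.1, R.2)

def pvUpdate (T L : Nat → Int) (node : Nat) (s e l r v : Int) : (Nat → Int) × (Nat → Int) :=
  pvUpdateF ((e - s).toNat + 1) T L node s e l r v

-- query_sum (returns the result together with the mutated arrays); same fuel scheme
def pvQueryF : Nat → (Nat → Int) → (Nat → Int) → Nat → Int → Int → Int → Int → Int × (Nat → Int) × (Nat → Int)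
  | 0, T, L, _, _, _, _, _ => (0, T, L)
  | fuel + 1, T, L, node, s, e, l, r =>
    if s > e ∨ s > r ∨ e < l then (0, T, L)
    else
      let P := pvPushDown T L node s e
      if l ≤ s ∧ e ≤ r then (P.1 node, P)
      else
        let Q := pvQueryF fuel P.1 P.2 (2 * node) s (pvMid s e) l r
        let R := pvQueryF fuel Q.2.1 Q.2.2 (2 * node + 1) (pvMid s e + 1) e l r
        (Q.1 + R.1, R.2)

def pvQuery (T L : Nat → Int) (node : Nat) (s e l r : Int) : Int × (Nat → Int) × (Nat → Int) :=
  pvQueryF ((e - s).toNat + 1) T L node s e l r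

-- the main loop over queries; the `| _ => []` arms are unreachable under Pre_ (Python raises there)
def pvLoopA (n : Int) (qs : List (List Int)) (T L : Nat → Int) : List Int :=
  match qs with
  | [] => []
  | q :: rest =>
    if q.headD 0 = 0 then
      match q with
      | [_, s, t, x] =>
        let U := pvUpdate T L 1 1 n s t x
        pvLoopA n rest U.1 U.2
      | _ => []
    else
      match q with
      | [_, s, t] =>
        let Q := pvQuery T L 1 1 n s t
        Q.1 :: pvLoopA n rest Q.2.1 Q.2.2
      | _ => []

def range_add_range_sum (n : Int) (queries : List (List Int)) : List Int :=
  pvLoopA n queries (fun _ => 0) (fun _ => 0)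

-- ===== PORT B =====
-- contribution of one past add (a, b, x) to a sum query clamped to [lo, hi]
def pvOverlap (lo hi : Int) (u : Int × Int × Int) : Int :=
  let len := min u.2.1 hi - max u.1 lo + 1
  if len > 0 then u.2.2 * len else 0

def pvLoopB (n : Int) (qs : List (List Int)) (adds : List (Int × Int × Int)) : List Int :=
  match qs with
  | [] => []
  | q :: rest =>
    if q.headD 0 = 0 then
      match q with
      | [_, s, t, x] => pvLoopB n rest (adds ++ [(s, t, x)])
      | _ => []
    else
      match q with
      | [_, s, t] =>
        (adds.foldl (fun acc u => acc + pvOverlap (max s 1) (min t n) u) 0) :: pvLoopB n rest adds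
      | _ => []

def range_add_range_sum_alt (n : Int) (queries : List (List Int)) : List Int :=
  pvLoopB n queries []

-- ===== PRECONDITION & SPEC =====
-- a query list has the shape Python unpacks without raising
def pvQOk (q : List Int) : Bool :=
  match q with
  | [a, _, _] => a != 0
  | [a, _, _, _] => a == 0
  | _ => false

-- Pre_ excludes exactly the inputs where Python A raises: malformed query rows
-- (unpacking ValueError / IndexError on []) and n ≤ 0 together with a range-add query
-- (IndexError on the empty lazy array).  A returns on everything admitted here.
def Pre_range_add_range_sum (n : Int) (queries : List (List Int)) : Prop :=
  (∀ q ∈ queries, pvQOk q = true) ∧ (1 ≤ n ∨ ∀ q ∈ queries, q.length = 3)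
instance (n : Int) (queries : List (List Int)) : Decidable (Pre_range_add_range_sum n queries) := by
  unfold Pre_range_add_range_sum; infer_instance

def pvWitness_range_add_range_sum : Int × List (List Int) := (5, [[0, 1, 3, 2], [1, 2, 4]])

def Spec_range_add_range_sum (n : Int) (queries : List (List Int)) (out : List Int) : Prop := out = range_add_range_sum_alt n queries
instance (n : Int) (queries : List (List Int)) (out : List Int) : Decidable (Spec_range_add_range_sum n queries out) := by unfold Spec_range_add_range_sum; infer_instance

-- ===== CLAIM (what is proved, stated in full; the proofs are below) =====
def Claim_equal_range_add_range_sum : Prop := ∀ (n : Int) (queries : List (List Int)), Dom_range_add_range_sum n queries → Pre_range_add_range_sum n queries → Spec_range_add_range_sum n queries (range_add_range_sum n queries)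

-- ===== LEMMAS AND PROOFS =====

-- claimed true sum of the subtree at `node` covering [s, e]
def pvSeg (T L : Nat → Int) (node : Nat) (s e : Int) : Int := T node + L node * (e - s + 1)

-- structural invariant of A's arrays at the subtree of `node`
def pvGood (T L : Nat → Int) (node : Nat) (s e : Int) : Prop :=
  if s < e then
    T node = pvSeg T L (2 * node) s (pvMid s e) + pvSeg T L (2 * node + 1) (pvMid s e + 1) e
    ∧ pvGood T L (2 * node) s (pvMid s e) ∧ pvGood T L (2 * node + 1) (pvMid s e + 1) e
  else True
termination_by (e - s).toNat
decreasing_by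
  all_goals have h2 : pvMid s e = (s + e) / 2 := PySem.Int.floordiv_eq_ediv_of_pos (by omega)
  all_goals rename_i h; rw [h2]; omega

-- the current array value at index i, read off the tree
def pvVal (T L : Nat → Int) (node : Nat) (s e i : Int) : Int :=
  if s < e then
    L node + (if i ≤ pvMid s e then pvVal T L (2 * node) s (pvMid s e) i
              else pvVal T L (2 * node + 1) (pvMid s e + 1) e i)
  else T node + L node
termination_by (e - s).toNat
decreasing_by
  all_goals have h2 : pvMid s e = (s + e) / 2 := PySem.Int.floordiv_eq_ediv_of_pos (by omega)
  all_goals rename_i h _; rw [h2]; omega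

-- membership in the subtree rooted at `node` (binary heap indexing)
def pvInT (node m : Nat) : Prop := ∃ k, m / 2 ^ k = node

lemma pvInT_self (node : Nat) : pvInT node node := ⟨0, by simp⟩
lemma pvInT_le {node m : Nat} (h : pvInT node m) : node ≤ m := by
  obtain ⟨k, hk⟩ := h; calc node = m / 2 ^ k := hk.symm
    _ ≤ m := Nat.div_le_self _ _
lemma pvInT_left {node m : Nat} (h : pvInT (2 * node) m) : pvInT node m := by
  obtain ⟨k, hk⟩ := h
  exact ⟨k + 1, by rw [pow_succ, ← Nat.div_div_eq_div_mul, hk]; omega⟩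
lemma pvInT_right {node m : Nat} (h : pvInT (2 * node + 1) m) : pvInT node m := by
  obtain ⟨k, hk⟩ := h
  exact ⟨k + 1, by rw [pow_succ, ← Nat.div_div_eq_div_mul, hk]; omega⟩
lemma pvInT_disj {node m : Nat} (hn : 1 ≤ node)
    (hl : pvInT (2 * node) m) (hr : pvInT (2 * node + 1) m) : False := by
  obtain ⟨j, hj⟩ := hl; obtain ⟨k, hk⟩ := hr
  rcases Nat.lt_trichotomy j k with h | h | h
  · have : m / 2 ^ j / 2 ^ (k - j) = m / 2 ^ k := by
      rw [Nat.div_div_eq_div_mul, ← pow_add]; congr 2; omega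
    rw [hj] at this
    have h2 : (2:Nat) ≤ 2 ^ (k - j) := by
      calc (2:Nat) = 2 ^ 1 := rfl
        _ ≤ 2 ^ (k - j) := Nat.pow_le_pow_right (by omega) (by omega)
    have := Nat.div_le_div_left (a := 2 * node) h2 (by omega)
    omega
  · rw [h] at hj; omega
  · have : m / 2 ^ k / 2 ^ (j - k) = m / 2 ^ j := by
      rw [Nat.div_div_eq_div_mul, ← pow_add]; congr 2; omega
    rw [hk] at this
    have h2 : (2:Nat) ≤ 2 ^ (j - k) := by
      calc (2:Nat) = 2 ^ 1 := rfl
        _ ≤ 2 ^ (j - k) := Nat.pow_le_pow_right (by omega) (by omega)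
    have := Nat.div_le_div_left (a := 2 * node + 1) h2 (by omega)
    omega

-- the midpoint bounds used throughout
lemma pvMid_bounds {s e : Int} (h : s < e) : s ≤ pvMid s e ∧ pvMid s e < e := by
  have h2 : pvMid s e = (s + e) / 2 := PySem.Int.floordiv_eq_ediv_of_pos (by omega)
  rw [h2]; omega

-- congruence: pvVal / pvGood read T on the whole subtree but L only below the root;
-- pvVal is stated with an offset c added to L at the root
lemma pvVal_shift {T L T' L' : Nat → Int} {node : Nat} {s e i c : Int} (hn : 1 ≤ node)
    (hT : ∀ m, pvInT node m → T m = T' m)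
    (hL : ∀ m, pvInT node m → m ≠ node → L m = L' m)
    (hroot : L' node = L node + c) :
    pvVal T' L' node s e i = pvVal T L node s e i + c := by
  by_cases hse : s < e
  · rw [pvVal.eq_def (T := T'), pvVal.eq_def (T := T), if_pos hse, if_pos hse]
    have hml : pvInT node (2 * node) := pvInT_left (pvInT_self _)
    have hmr : pvInT node (2 * node + 1) := pvInT_right (pvInT_self _)
    by_cases hi : i ≤ pvMid s e
    · rw [if_pos hi, if_pos hi]
      have hrec := pvVal_shift (T := T) (L := L) (T' := T') (L' := L')
          (node := 2 * node) (s := s) (e := pvMid s e) (i := i) (c := 0) (by omega)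
          (fun m hm => hT m (pvInT_left hm))
          (fun m hm hne => hL m (pvInT_left hm) (by have := pvInT_le hm; omega))
          (by rw [← hL (2 * node) hml (by omega)]; ring)
      rw [hrec, hroot]; ring
    · rw [if_neg hi, if_neg hi]
      have hrec := pvVal_shift (T := T) (L := L) (T' := T') (L' := L')
          (node := 2 * node + 1) (s := pvMid s e + 1) (e := e) (i := i) (c := 0) (by omega)
          (fun m hm => hT m (pvInT_right hm))
          (fun m hm hne => hL m (pvInT_right hm) (by have := pvInT_le hm; omega))
          (by rw [← hL (2 * node + 1) hmr (by omega)]; ring)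
      rw [hrec, hroot]; ring
  · rw [pvVal.eq_def (T := T'), pvVal.eq_def (T := T), if_neg hse, if_neg hse,
      ← hT node (pvInT_self _), hroot]
    ring
termination_by (e - s).toNat
decreasing_by
  all_goals have h2 : pvMid s e = (s + e) / 2 := PySem.Int.floordiv_eq_ediv_of_pos (by omega)
  all_goals rw [h2]; omega

lemma pvVal_congr {T L T' L' : Nat → Int} {node : Nat} {s e i : Int} (hn : 1 ≤ node)
    (hT : ∀ m, pvInT node m → T m = T' m)
    (hL : ∀ m, pvInT node m → L m = L' m) :
    pvVal T' L' node s e i = pvVal T L node s e i := by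
  have := pvVal_shift (i := i) (s := s) (e := e) (c := 0) hn hT
    (fun m hm _ => hL m hm) (by rw [← hL node (pvInT_self _)]; ring)
  omega

lemma pvGood_congr {T L T' L' : Nat → Int} {node : Nat} {s e : Int} (hn : 1 ≤ node)
    (hT : ∀ m, pvInT node m → T m = T' m)
    (hL : ∀ m, pvInT node m → m ≠ node → L m = L' m)
    (h : pvGood T L node s e) : pvGood T' L' node s e := by
  by_cases hse : s < e
  · rw [pvGood.eq_def, if_pos hse] at h ⊢
    obtain ⟨h1, h2, h3⟩ := h
    have hml : pvInT node (2 * node) := pvInT_left (pvInT_self _)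
    have hmr : pvInT node (2 * node + 1) := pvInT_right (pvInT_self _)
    refine ⟨?_, ?_, ?_⟩
    · unfold pvSeg
      rw [← hT node (pvInT_self _), ← hT _ hml, ← hT _ hmr,
        ← hL _ hml (by omega), ← hL _ hmr (by omega)]
      exact h1
    · exact pvGood_congr (by omega) (fun m hm => hT m (pvInT_left hm))
        (fun m hm hne => hL m (pvInT_left hm) (by have := pvInT_le hm; omega)) h2
    · exact pvGood_congr (by omega) (fun m hm => hT m (pvInT_right hm))
        (fun m hm hne => hL m (pvInT_right hm) (by have := pvInT_le hm; omega)) h3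
  · rw [pvGood.eq_def, if_neg hse]; trivial
termination_by (e - s).toNat
decreasing_by
  all_goals have h2 : pvMid s e = (s + e) / 2 := PySem.Int.floordiv_eq_ediv_of_pos (by omega)
  all_goals rw [h2]; omega

-- pushDown facts
lemma pvPushDown_unch {T L : Nat → Int} {node m : Nat} {s e : Int} (h : ¬ pvInT node m) :
    (pvPushDown T L node s e).1 m = T m ∧ (pvPushDown T L node s e).2 m = L m := by
  have hm1 : m ≠ node := fun h' => h (h' ▸ pvInT_self node)
  have hm2 : m ≠ 2 * node := fun h' => h (h' ▸ pvInT_left (pvInT_self _))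
  have hm3 : m ≠ 2 * node + 1 := fun h' => h (h' ▸ pvInT_right (pvInT_self _))
  unfold pvPushDown
  split_ifs <;> simp [hm1, hm2, hm3]

lemma pvPushDown_T_node (T L : Nat → Int) (node : Nat) (s e : Int) :
    (pvPushDown T L node s e).1 node = pvSeg T L node s e := by
  unfold pvPushDown pvSeg
  split_ifs <;> simp_all

lemma pvPushDown_L_node (T L : Nat → Int) (node : Nat) (s e : Int) :
    (pvPushDown T L node s e).2 node = 0 := by
  unfold pvPushDown
  split_ifs <;> simp_all

lemma pvPushDown_seg (T L : Nat → Int) (node : Nat) (s e : Int) :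
    pvSeg (pvPushDown T L node s e).1 (pvPushDown T L node s e).2 node s e = pvSeg T L node s e := by
  have h1 := pvPushDown_T_node T L node s e
  have h2 := pvPushDown_L_node T L node s e
  unfold pvSeg at *
  rw [h1, h2]; ring

lemma pvPushDown_good {T L : Nat → Int} {node : Nat} {s e : Int} (hn : 1 ≤ node)
    (h : pvGood T L node s e) :
    pvGood (pvPushDown T L node s e).1 (pvPushDown T L node s e).2 node s e := by
  by_cases hse : s < e
  · have hne : s ≠ e := by omega
    rw [pvGood.eq_def, if_pos hse] at h
    obtain ⟨h1, h2, h3⟩ := h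
    by_cases hLz : L node ≠ 0
    · have hT1 : ∀ m, (pvPushDown T L node s e).1 m
          = if m = node then T m + L node * (e - s + 1) else T m := by
        intro m; unfold pvPushDown; rw [if_pos hLz, if_pos hne]
      have hL1 : ∀ m, (pvPushDown T L node s e).2 m
          = if m = node then 0 else if m = 2 * node ∨ m = 2 * node + 1 then L m + L node else L m := by
        intro m; unfold pvPushDown; rw [if_pos hLz, if_pos hne]
      have e1 : (2 * node) ≠ node := by omega
      have e2 : (2 * node + 1) ≠ node := by omega
      rw [pvGood.eq_def, if_pos hse]
      refine ⟨?_, ?_, ?_⟩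
      · unfold pvSeg at h1 ⊢
        rw [hT1 node, hT1 (2 * node), hT1 (2 * node + 1), hL1 (2 * node), hL1 (2 * node + 1)]
        rw [if_pos rfl, if_neg e1, if_neg e2, if_neg e1, if_neg e2,
          if_pos (Or.inl rfl), if_pos (Or.inr rfl)]
        nlinarith [h1]
      · refine pvGood_congr (by omega) ?_ ?_ h2
        · intro m hm
          have := pvInT_le hm
          rw [hT1 m, if_neg (by omega)]
        · intro m hm hne2
          have := pvInT_le hm
          rw [hL1 m, if_neg (by omega), if_neg ?_]
          rintro (h' | h')
          · exact hne2 h'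
          · exact pvInT_disj (show 1 ≤ node by omega) (h' ▸ hm) (pvInT_self _)
      · refine pvGood_congr (by omega) ?_ ?_ h3
        · intro m hm
          have := pvInT_le hm
          rw [hT1 m, if_neg (by omega)]
        · intro m hm hne2
          have := pvInT_le hm
          rw [hL1 m, if_neg (by omega), if_neg ?_]
          rintro (h' | h')
          · exact pvInT_disj (show 1 ≤ node by omega) (by rw [h']; exact pvInT_self _) hm
          · exact hne2 h'
    · unfold pvPushDown; rw [if_neg hLz]
      rw [pvGood.eq_def, if_pos hse]; exact ⟨h1, h2, h3⟩
  · rw [pvGood.eq_def, if_neg hse]; trivial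

lemma pvPushDown_val (T L : Nat → Int) (node : Nat) (s e i : Int) (hn : 1 ≤ node) (hse : s ≤ e) :
    pvVal (pvPushDown T L node s e).1 (pvPushDown T L node s e).2 node s e i = pvVal T L node s e i := by
  by_cases hLz : L node ≠ 0
  · by_cases hlt : s < e
    · have hne : s ≠ e := by omega
      have hT1 : ∀ m, (pvPushDown T L node s e).1 m
          = if m = node then T m + L node * (e - s + 1) else T m := by
        intro m; unfold pvPushDown; rw [if_pos hLz, if_pos hne]
      have hL1 : ∀ m, (pvPushDown T L node s e).2 m
          = if m = node then 0 else if m = 2 * node ∨ m = 2 * node + 1 then L m + L node else L m := by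
        intro m; unfold pvPushDown; rw [if_pos hLz, if_pos hne]
      rw [pvVal.eq_def, pvVal.eq_def (T := T), if_pos hlt, if_pos hlt, hL1 node, if_pos rfl]
      by_cases hi : i ≤ pvMid s e
      · rw [if_pos hi, if_pos hi]
        have hsh := pvVal_shift (T := T) (L := L)
            (T' := (pvPushDown T L node s e).1) (L' := (pvPushDown T L node s e).2)
            (node := 2 * node) (s := s) (e := pvMid s e) (i := i) (c := L node) (by omega)
            (fun m hm => by have := pvInT_le hm; rw [hT1 m, if_neg (by omega)])
            (fun m hm hne2 => by
              have := pvInT_le hm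
              rw [hL1 m, if_neg (by omega), if_neg ?_]
              rintro (h' | h')
              · exact hne2 h'
              · exact pvInT_disj (show 1 ≤ node by omega) (h' ▸ hm) (pvInT_self _))
            (by rw [hL1 (2 * node), if_neg (by omega), if_pos (Or.inl rfl)])
        rw [hsh]; ring
      · rw [if_neg hi, if_neg hi]
        have hsh := pvVal_shift (T := T) (L := L)
            (T' := (pvPushDown T L node s e).1) (L' := (pvPushDown T L node s e).2)
            (node := 2 * node + 1) (s := pvMid s e + 1) (e := e) (i := i) (c := L node) (by omega)
            (fun m hm => by have := pvInT_le hm; rw [hT1 m, if_neg (by omega)])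
            (fun m hm hne2 => by
              have := pvInT_le hm
              rw [hL1 m, if_neg (by omega), if_neg ?_]
              rintro (h' | h')
              · exact pvInT_disj (show 1 ≤ node by omega) (by rw [h']; exact pvInT_self _) hm
              · exact hne2 h')
            (by rw [hL1 (2 * node + 1), if_neg (by omega), if_pos (Or.inr rfl)])
        rw [hsh]; ring
    · have heq : s = e := by omega
      have hne : ¬ s ≠ e := by omega
      have hT1 : ∀ m, (pvPushDown T L node s e).1 m
          = if m = node then T m + L node * (e - s + 1) else T m := by
        intro m; unfold pvPushDown; rw [if_pos hLz, if_neg hne]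
      have hL1 : ∀ m, (pvPushDown T L node s e).2 m = if m = node then 0 else L m := by
        intro m; unfold pvPushDown; rw [if_pos hLz, if_neg hne]
      rw [pvVal.eq_def, pvVal.eq_def (T := T), if_neg (by omega : ¬ s < e),
        if_neg (by omega : ¬ s < e), hT1 node, hL1 node, if_pos rfl, if_pos rfl]
      have : e - s + 1 = 1 := by omega
      rw [this]; ring
  · unfold pvPushDown; rw [if_neg hLz]

-- splitting an integer-interval sum at the midpoint
lemma pvIcc_split (a b c : Int) (h1 : a ≤ b + 1) (h2 : b ≤ c) (f : Int → Int) :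
    (Finset.Icc a c).sum f = (Finset.Icc a b).sum f + (Finset.Icc (b + 1) c).sum f := by
  have hd : Disjoint (Finset.Icc a b) (Finset.Icc (b + 1) c) := by
    rw [Finset.disjoint_left]; intro i hi hi'
    simp only [Finset.mem_Icc] at hi hi'; omega
  rw [← Finset.sum_union hd]
  apply Finset.sum_congr _ (fun _ _ => rfl)
  ext i; simp only [Finset.mem_Icc, Finset.mem_union]; omega

-- the invariant ties pvSeg to the pointwise values
lemma pvSeg_eq_sum {T L : Nat → Int} {node : Nat} {s e : Int} (h : pvGood T L node s e)
    (hse : s ≤ e) :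
    pvSeg T L node s e = (Finset.Icc s e).sum (fun i => pvVal T L node s e i) := by
  by_cases hlt : s < e
  · rw [pvGood.eq_def, if_pos hlt] at h
    obtain ⟨h1, h2, h3⟩ := h
    have hmb := pvMid_bounds hlt
    have IHl := pvSeg_eq_sum h2 (by omega)
    have IHr := pvSeg_eq_sum h3 (by omega)
    rw [pvIcc_split s (pvMid s e) e (by omega) (by omega)]
    have hcl : ∀ i ∈ Finset.Icc s (pvMid s e),
        pvVal T L node s e i = L node + pvVal T L (2 * node) s (pvMid s e) i := by
      intro i hi; simp only [Finset.mem_Icc] at hi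
      rw [pvVal.eq_def, if_pos hlt, if_pos hi.2]
    have hcr : ∀ i ∈ Finset.Icc (pvMid s e + 1) e,
        pvVal T L node s e i = L node + pvVal T L (2 * node + 1) (pvMid s e + 1) e i := by
      intro i hi; simp only [Finset.mem_Icc] at hi
      rw [pvVal.eq_def, if_pos hlt, if_neg (by omega)]
    rw [Finset.sum_congr rfl hcl, Finset.sum_congr rfl hcr,
      Finset.sum_add_distrib, Finset.sum_add_distrib, ← IHl, ← IHr,
      Finset.sum_const, Finset.sum_const, Int.card_Icc, Int.card_Icc,
      Int.nsmul_eq_mul, Int.nsmul_eq_mul]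
    have c1 : ((pvMid s e + 1 - s).toNat : Int) = pvMid s e + 1 - s := by omega
    have c2 : ((e + 1 - (pvMid s e + 1)).toNat : Int) = e - pvMid s e := by omega
    rw [c1, c2]
    unfold pvSeg at h1 ⊢
    nlinarith [h1]
  · have heq : s = e := by omega
    subst heq
    rw [Finset.Icc_self, Finset.sum_singleton, pvVal.eq_def, if_neg (by omega)]
    unfold pvSeg; ring
termination_by (e - s).toNat
decreasing_by
  all_goals have h2 : pvMid s e = (s + e) / 2 := PySem.Int.floordiv_eq_ediv_of_pos (by omega)
  all_goals rw [h2]; omega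

-- main spec of update_range
lemma pvUpdateF_spec (fuel : Nat) : ∀ (T L : Nat → Int) (node : Nat) (s e l r v : Int), 1 ≤ node → pvGood T L node s e → (e - s).toNat < fuel →
    pvGood (pvUpdateF fuel T L node s e l r v).1 (pvUpdateF fuel T L node s e l r v).2 node s e
      ∧ (pvUpdateF fuel T L node s e l r v).2 node = 0
      ∧ pvSeg (pvUpdateF fuel T L node s e l r v).1 (pvUpdateF fuel T L node s e l r v).2 node s e
          = pvSeg T L node s e + (Finset.Icc s e).sum (fun i => if l ≤ i ∧ i ≤ r then v else 0)
      ∧ (∀ i, s ≤ i → i ≤ e →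
          pvVal (pvUpdateF fuel T L node s e l r v).1 (pvUpdateF fuel T L node s e l r v).2 node s e i
            = pvVal T L node s e i + (if l ≤ i ∧ i ≤ r then v else 0))
      ∧ (∀ m, ¬ pvInT node m → (pvUpdateF fuel T L node s e l r v).1 m = T m ∧ (pvUpdateF fuel T L node s e l r v).2 m = L m) := by
  induction fuel with
  | zero => intro T L node s e l r v _ _ hf; omega
  | succ k ih =>
    intro T L node s e l r v hn hG hf
    by_cases hdis : s > e ∨ s > r ∨ e < l
    · have hq : pvUpdateF (k + 1) T L node s e l r v = pvPushDown T L node s e := by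
        simp only [pvUpdateF]; simp only [if_pos hdis]
      rw [hq]
      refine ⟨pvPushDown_good hn hG, pvPushDown_L_node T L node s e, ?_, ?_, fun m hm => pvPushDown_unch hm⟩
      · rw [pvPushDown_seg]
        have : (Finset.Icc s e).sum (fun i => if l ≤ i ∧ i ≤ r then v else 0) = 0 := by
          rw [Finset.sum_eq_zero]
          intro i hi; simp only [Finset.mem_Icc] at hi
          rw [if_neg (by omega)]
        rw [this]; ring
      · intro i his hie
        rw [pvPushDown_val T L node s e i hn (by omega), if_neg (by omega)]; ring
    · have hse : s ≤ e := by omega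
      by_cases hcov : l ≤ s ∧ e ≤ r
      · set P := pvPushDown T L node s e with hPdef
        have hq : pvUpdateF (k + 1) T L node s e l r v
            = pvPushDown P.1 (fun m => if m = node then P.2 m + v else P.2 m) node s e := by
          simp only [pvUpdateF]; simp only [if_neg hdis, if_pos hcov]; rfl
        set L2 : Nat → Int := fun m => if m = node then P.2 m + v else P.2 m with hL2def
        have hL2root : L2 node = P.2 node + v := by rw [hL2def]; simp
        have hL2off : ∀ m, m ≠ node → L2 m = P.2 m := by
          intro m hm; rw [hL2def]; simp [hm]
        have hGP : pvGood P.1 P.2 node s e := pvPushDown_good hn hG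
        have hGL2 : pvGood P.1 L2 node s e := by
          refine pvGood_congr hn (fun _ _ => rfl) ?_ hGP
          intro m _ hm; exact (hL2off m hm).symm
        have hPL0 : P.2 node = 0 := pvPushDown_L_node T L node s e
        have hsum : (Finset.Icc s e).sum (fun i => if l ≤ i ∧ i ≤ r then v else 0) = (e - s + 1) * v := by
          have : ∀ i ∈ Finset.Icc s e, (if l ≤ i ∧ i ≤ r then v else 0) = v := by
            intro i hi; simp only [Finset.mem_Icc] at hi
            rw [if_pos (by omega)]
          rw [Finset.sum_congr rfl this, Finset.sum_const, Int.card_Icc, Int.nsmul_eq_mul]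
          have : ((e + 1 - s).toNat : Int) = e - s + 1 := by omega
          rw [this]
        rw [hq]
        refine ⟨pvPushDown_good hn hGL2, pvPushDown_L_node _ _ _ _ _, ?_, ?_, ?_⟩
        · rw [pvPushDown_seg, hsum]
          unfold pvSeg
          rw [hL2root]
          have := pvPushDown_seg T L node s e
          unfold pvSeg at this
          linear_combination this
        · intro i his hie
          rw [pvPushDown_val P.1 L2 node s e i hn hse]
          have hsh := pvVal_shift (T := P.1) (L := P.2) (T' := P.1) (L' := L2)
            (node := node) (s := s) (e := e) (i := i) (c := v) hn
            (fun _ _ => rfl) (fun m _ hm => (hL2off m hm).symm) hL2root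
          rw [hsh, pvPushDown_val T L node s e i hn hse, if_pos (by omega)]
        · intro m hm
          have hm1 : m ≠ node := fun h' => hm (h' ▸ pvInT_self node)
          have h1 := pvPushDown_unch (T := P.1) (L := L2) (s := s) (e := e) hm
          have h2 := pvPushDown_unch (T := T) (L := L) (s := s) (e := e) hm
          rw [h1.1, h1.2, hL2off m hm1, h2.1, h2.2]
          exact ⟨rfl, rfl⟩
      · have hlt : s < e := by omega
        have hne : s ≠ e := by omega
        have hmb := pvMid_bounds hlt
        set P := pvPushDown T L node s e with hPdef
        set Q := pvUpdateF k P.1 P.2 (2 * node) s (pvMid s e) l r v with hQdef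
        set R := pvUpdateF k Q.1 Q.2 (2 * node + 1) (pvMid s e + 1) e l r v with hRdef
        have hq : pvUpdateF (k + 1) T L node s e l r v
            = (fun m => if m = node then R.1 (2 * node) + R.1 (2 * node + 1) else R.1 m, R.2) := by
          simp only [pvUpdateF]
          simp only [if_neg hdis, if_neg hcov, if_pos hne, hPdef, hQdef, hRdef]
        have hGP := pvPushDown_good hn hG
        rw [pvGood.eq_def, if_pos hlt] at hGP
        obtain ⟨g1, g2, g3⟩ := hGP
        have IHl := ih P.1 P.2 (2 * node) s (pvMid s e) l r v (by omega) g2 (by omega)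
        obtain ⟨u1, u2, u3, u4, u5⟩ := IHl
        have hGr : pvGood Q.1 Q.2 (2 * node + 1) (pvMid s e + 1) e := by
          refine pvGood_congr (by omega) ?_ ?_ g3
          · intro m hm
            exact ((u5 m (fun h => pvInT_disj hn h hm)).1).symm
          · intro m hm _
            exact ((u5 m (fun h => pvInT_disj hn h hm)).2).symm
        have IHr := ih Q.1 Q.2 (2 * node + 1) (pvMid s e + 1) e l r v (by omega) hGr (by omega)
        obtain ⟨w1, w2, w3, w4, w5⟩ := IHr
        rw [← hPdef] at g1 g2 g3
        rw [← hQdef] at u1 u2 u3 u4 u5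
        rw [← hRdef] at w1 w2 w3 w4 w5
        have hnotl : ¬ pvInT (2 * node) node := fun h => by have := pvInT_le h; omega
        have hnotr : ¬ pvInT (2 * node + 1) node := fun h => by have := pvInT_le h; omega
        have h2nl : ¬ pvInT (2 * node + 1) (2 * node) := fun h => by have := pvInT_le h; omega
        have e1 : (2 * node) ≠ node := by omega
        have e2 : (2 * node + 1) ≠ node := by omega
        have hPL0 : P.2 node = 0 := pvPushDown_L_node T L node s e
        have hL0 : R.2 node = 0 := by rw [(w5 node hnotr).2, (u5 node hnotl).2, hPL0]
        have hQ2l : Q.2 (2 * node) = 0 := u2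
        have hR2l : R.2 (2 * node) = 0 := by rw [(w5 (2 * node) h2nl).2]; exact hQ2l
        have hR2r : R.2 (2 * node + 1) = 0 := w2
        -- the two final child totals
        have hfl : R.1 (2 * node)
            = pvSeg P.1 P.2 (2 * node) s (pvMid s e)
              + (Finset.Icc s (pvMid s e)).sum (fun i => if l ≤ i ∧ i ≤ r then v else 0) := by
          rw [(w5 (2 * node) h2nl).1]
          have := u3
          unfold pvSeg at this ⊢
          rw [hQ2l] at this
          linear_combination this
        have hfr : R.1 (2 * node + 1)
            = pvSeg P.1 P.2 (2 * node + 1) (pvMid s e + 1) e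
              + (Finset.Icc (pvMid s e + 1) e).sum (fun i => if l ≤ i ∧ i ≤ r then v else 0) := by
          have hsegQr : pvSeg Q.1 Q.2 (2 * node + 1) (pvMid s e + 1) e
              = pvSeg P.1 P.2 (2 * node + 1) (pvMid s e + 1) e := by
            unfold pvSeg
            rw [(u5 (2 * node + 1) (fun h => pvInT_disj hn h (pvInT_self _))).1,
              (u5 (2 * node + 1) (fun h => pvInT_disj hn h (pvInT_self _))).2]
          have := w3
          rw [hsegQr] at this
          unfold pvSeg at this ⊢
          rw [hR2r] at this
          linear_combination this
        -- pvVal over the left child is unchanged by the right update / final push-up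
        have hvalRl : ∀ i, pvVal (fun m => if m = node then R.1 (2 * node) + R.1 (2 * node + 1) else R.1 m) R.2
              (2 * node) s (pvMid s e) i = pvVal Q.1 Q.2 (2 * node) s (pvMid s e) i := by
          intro i
          refine pvVal_congr (by omega) ?_ ?_
          · intro m hm
            have := pvInT_le hm
            rw [if_neg (by omega), (w5 m (fun h => pvInT_disj hn hm h)).1]
          · intro m hm
            exact ((w5 m (fun h => pvInT_disj hn hm h)).2).symm
        have hvalRr : ∀ i, pvVal (fun m => if m = node then R.1 (2 * node) + R.1 (2 * node + 1) else R.1 m) R.2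
              (2 * node + 1) (pvMid s e + 1) e i = pvVal R.1 R.2 (2 * node + 1) (pvMid s e + 1) e i := by
          intro i
          refine pvVal_congr (by omega) ?_ ?_
          · intro m hm
            have := pvInT_le hm
            rw [if_neg (by omega)]
          · intro m _; rfl
        have hvalQr : ∀ i, pvVal Q.1 Q.2 (2 * node + 1) (pvMid s e + 1) e i
            = pvVal P.1 P.2 (2 * node + 1) (pvMid s e + 1) e i := by
          intro i
          exact pvVal_congr (by omega)
            (fun m hm => ((u5 m (fun h => pvInT_disj hn h hm)).1).symm)
            (fun m hm => ((u5 m (fun h => pvInT_disj hn h hm)).2).symm)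
        have hvalP : ∀ i, pvVal P.1 P.2 node s e i
            = if i ≤ pvMid s e then pvVal P.1 P.2 (2 * node) s (pvMid s e) i
              else pvVal P.1 P.2 (2 * node + 1) (pvMid s e + 1) e i := by
          intro i; rw [pvVal.eq_def, if_pos hlt, hPL0, zero_add]
        rw [hq]
        refine ⟨?_, hL0, ?_, ?_, ?_⟩
        · -- pvGood restored
          dsimp only
          rw [pvGood.eq_def, if_pos hlt]
          refine ⟨?_, ?_, ?_⟩
          · unfold pvSeg
            dsimp only
            rw [if_pos rfl, if_neg e1, if_neg e2, hR2l, hR2r]; ring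
          · refine pvGood_congr (by omega) ?_ ?_ u1
            · intro m hm
              have := pvInT_le hm
              rw [if_neg (by omega), (w5 m (fun h => pvInT_disj hn hm h)).1]
            · intro m hm _
              exact ((w5 m (fun h => pvInT_disj hn hm h)).2).symm
          · refine pvGood_congr (by omega) ?_ ?_ w1
            · intro m hm
              have := pvInT_le hm
              rw [if_neg (by omega)]
            · intro m _ _; rfl
        · -- pvSeg gains the added mass
          unfold pvSeg
          dsimp only
          rw [if_pos rfl, hL0, hfl, hfr,
            pvIcc_split s (pvMid s e) e (by omega) (by omega) (fun i => if l ≤ i ∧ i ≤ r then v else 0)]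
          have hsegP := pvPushDown_seg T L node s e
          rw [← hPdef] at hsegP
          unfold pvSeg at hsegP
          rw [← hsegP, hPL0]
          linear_combination -g1
        · -- pvVal gains the update
          intro i his hie
          dsimp only
          rw [pvVal.eq_def, if_pos hlt, hL0, zero_add,
            ← pvPushDown_val T L node s e i hn hse, hvalP i]
          by_cases hi : i ≤ pvMid s e
          · rw [if_pos hi, if_pos hi, hvalRl i, u4 i (by omega) (by omega)]
          · rw [if_neg hi, if_neg hi, hvalRr i, w4 i (by omega) (by omega), hvalQr i]
        · -- unchanged outside the subtree
          intro m hm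
          have hm1 : m ≠ node := fun h' => hm (h' ▸ pvInT_self node)
          have h1 := pvPushDown_unch (T := T) (L := L) (s := s) (e := e) hm
          have h2 := u5 m (fun h => hm (pvInT_left h))
          have h3 := w5 m (fun h => hm (pvInT_right h))
          constructor
          · dsimp only
            rw [if_neg hm1, h3.1, h2.1, hPdef, h1.1]
          · dsimp only
            rw [h3.2, h2.2, hPdef, h1.2]

-- main spec of query_sum
lemma pvQueryF_spec (fuel : Nat) : ∀ (T L : Nat → Int) (node : Nat) (s e l r : Int), 1 ≤ node → pvGood T L node s e → (e - s).toNat < fuel →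
    (pvQueryF fuel T L node s e l r).1
        = (Finset.Icc s e).sum (fun i => if l ≤ i ∧ i ≤ r then pvVal T L node s e i else 0)
      ∧ pvGood (pvQueryF fuel T L node s e l r).2.1 (pvQueryF fuel T L node s e l r).2.2 node s e
      ∧ pvSeg (pvQueryF fuel T L node s e l r).2.1 (pvQueryF fuel T L node s e l r).2.2 node s e = pvSeg T L node s e
      ∧ (∀ i, pvVal (pvQueryF fuel T L node s e l r).2.1 (pvQueryF fuel T L node s e l r).2.2 node s e i = pvVal T L node s e i)
      ∧ (∀ m, ¬ pvInT node m → (pvQueryF fuel T L node s e l r).2.1 m = T m ∧ (pvQueryF fuel T L node s e l r).2.2 m = L m) := by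
  induction fuel with
  | zero => intro T L node s e l r _ _ hf; omega
  | succ k ih =>
    intro T L node s e l r hn hG hf
    by_cases hdis : s > e ∨ s > r ∨ e < l
    · have hq : pvQueryF (k + 1) T L node s e l r = (0, T, L) := by
        simp only [pvQueryF]; simp only [if_pos hdis]
      rw [hq]
      refine ⟨?_, hG, rfl, fun _ => rfl, fun _ _ => ⟨rfl, rfl⟩⟩
      rw [Finset.sum_eq_zero]
      intro i hi; simp only [Finset.mem_Icc] at hi
      rw [if_neg (by omega)]
    · have hse : s ≤ e := by omega
      by_cases hcov : l ≤ s ∧ e ≤ r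
      · have hq : pvQueryF (k + 1) T L node s e l r = ((pvPushDown T L node s e).1 node, pvPushDown T L node s e) := by
          simp only [pvQueryF]; simp only [if_neg hdis, if_pos hcov]
        rw [hq]
        refine ⟨?_, pvPushDown_good hn hG, pvPushDown_seg T L node s e,
          fun i => pvPushDown_val T L node s e i hn hse, fun m hm => pvPushDown_unch hm⟩
        rw [pvPushDown_T_node, pvSeg_eq_sum hG hse]
        dsimp only
        apply Finset.sum_congr rfl
        intro i hi; simp only [Finset.mem_Icc] at hi
        rw [if_pos (by omega)]
      · have hlt : s < e := by omega
        have hmb := pvMid_bounds hlt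
        have hq : pvQueryF (k + 1) T L node s e l r =
            ((pvQueryF k (pvPushDown T L node s e).1 (pvPushDown T L node s e).2 (2 * node) s (pvMid s e) l r).1 +
              (pvQueryF k
                (pvQueryF k (pvPushDown T L node s e).1 (pvPushDown T L node s e).2 (2 * node) s (pvMid s e) l r).2.1
                (pvQueryF k (pvPushDown T L node s e).1 (pvPushDown T L node s e).2 (2 * node) s (pvMid s e) l r).2.2
                (2 * node + 1) (pvMid s e + 1) e l r).1,
             (pvQueryF k
                (pvQueryF k (pvPushDown T L node s e).1 (pvPushDown T L node s e).2 (2 * node) s (pvMid s e) l r).2.1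
                (pvQueryF k (pvPushDown T L node s e).1 (pvPushDown T L node s e).2 (2 * node) s (pvMid s e) l r).2.2
                (2 * node + 1) (pvMid s e + 1) e l r).2) := by
          simp only [pvQueryF]; simp only [if_neg hdis, if_neg hcov]
        set P := pvPushDown T L node s e with hPdef
        set Q := pvQueryF k P.1 P.2 (2 * node) s (pvMid s e) l r with hQdef
        set R := pvQueryF k Q.2.1 Q.2.2 (2 * node + 1) (pvMid s e + 1) e l r with hRdef
        have hGP := pvPushDown_good hn hG
        rw [pvGood.eq_def, if_pos hlt] at hGP
        obtain ⟨g1, g2, g3⟩ := hGP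
        have IHl := ih P.1 P.2 (2 * node) s (pvMid s e) l r (by omega) g2 (by omega)
        obtain ⟨l1, l2, l3, l4, l5⟩ := IHl
        have hGr : pvGood Q.2.1 Q.2.2 (2 * node + 1) (pvMid s e + 1) e := by
          refine pvGood_congr (by omega) ?_ ?_ g3
          · intro m hm
            exact ((l5 m (fun h => pvInT_disj hn h hm)).1).symm
          · intro m hm _
            exact ((l5 m (fun h => pvInT_disj hn h hm)).2).symm
        have IHr := ih Q.2.1 Q.2.2 (2 * node + 1) (pvMid s e + 1) e l r (by omega) hGr (by omega)
        obtain ⟨r1, r2, r3, r4, r5⟩ := IHr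
        -- node is not in either child subtree
        have hnotl : ¬ pvInT (2 * node) node := fun h => by have := pvInT_le h; omega
        have hnotr : ¬ pvInT (2 * node + 1) node := fun h => by have := pvInT_le h; omega
        have h2nl : ¬ pvInT (2 * node + 1) (2 * node) := fun h => by have := pvInT_le h; omega
        have hPL0 : P.2 node = 0 := pvPushDown_L_node T L node s e
        have hL0 : R.2.2 node = 0 := by rw [(r5 node hnotr).2, (l5 node hnotl).2, hPL0]
        have hT0 : R.2.1 node = P.1 node := by rw [(r5 node hnotr).1, (l5 node hnotl).1]
        -- the value function after push-down, seen from the node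
        have hvalP : ∀ i, pvVal P.1 P.2 node s e i
            = if i ≤ pvMid s e then pvVal P.1 P.2 (2 * node) s (pvMid s e) i
              else pvVal P.1 P.2 (2 * node + 1) (pvMid s e + 1) e i := by
          intro i; rw [pvVal.eq_def, if_pos hlt, hPL0, zero_add]
        -- pvVal over the right child is unchanged by the left query
        have hvalQr : ∀ i, pvVal Q.2.1 Q.2.2 (2 * node + 1) (pvMid s e + 1) e i
            = pvVal P.1 P.2 (2 * node + 1) (pvMid s e + 1) e i := by
          intro i
          exact pvVal_congr (by omega)
            (fun m hm => ((l5 m (fun h => pvInT_disj hn h hm)).1).symm)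
            (fun m hm => ((l5 m (fun h => pvInT_disj hn h hm)).2).symm)
        have hvalRl : ∀ i, pvVal R.2.1 R.2.2 (2 * node) s (pvMid s e) i
            = pvVal Q.2.1 Q.2.2 (2 * node) s (pvMid s e) i := by
          intro i
          exact pvVal_congr (by omega)
            (fun m hm => ((r5 m (fun h => pvInT_disj hn hm h)).1).symm)
            (fun m hm => ((r5 m (fun h => pvInT_disj hn hm h)).2).symm)
        rw [hq]
        refine ⟨?_, ?_, ?_, ?_, ?_⟩
        · -- result value
          rw [l1, r1, pvIcc_split s (pvMid s e) e (by omega) (by omega)]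
          dsimp only
          congr 1
          · apply Finset.sum_congr rfl
            intro i hi; simp only [Finset.mem_Icc] at hi
            by_cases hc : l ≤ i ∧ i ≤ r
            · rw [if_pos hc, if_pos hc, ← pvPushDown_val T L node s e i hn hse, hvalP i, if_pos hi.2]
            · rw [if_neg hc, if_neg hc]
          · apply Finset.sum_congr rfl
            intro i hi; simp only [Finset.mem_Icc] at hi
            by_cases hc : l ≤ i ∧ i ≤ r
            · rw [if_pos hc, if_pos hc, hvalQr i, ← pvPushDown_val T L node s e i hn hse,
                hvalP i, if_neg (by omega)]
            · rw [if_neg hc, if_neg hc]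
        · -- pvGood preserved
          rw [pvGood.eq_def, if_pos hlt]
          refine ⟨?_, ?_, ?_⟩
          · have hsegl : pvSeg R.2.1 R.2.2 (2 * node) s (pvMid s e) = pvSeg P.1 P.2 (2 * node) s (pvMid s e) := by
              unfold pvSeg
              rw [(r5 (2 * node) h2nl).1, (r5 (2 * node) h2nl).2]
              unfold pvSeg at l3
              rw [← l3]
            have hsegr : pvSeg R.2.1 R.2.2 (2 * node + 1) (pvMid s e + 1) e
                = pvSeg P.1 P.2 (2 * node + 1) (pvMid s e + 1) e := by
              rw [r3]
              unfold pvSeg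
              rw [(l5 (2 * node + 1) (fun h => pvInT_disj hn h (pvInT_self _))).1,
                (l5 (2 * node + 1) (fun h => pvInT_disj hn h (pvInT_self _))).2]
            rw [hT0, hsegl, hsegr]; exact g1
          · refine pvGood_congr (by omega) ?_ ?_ l2
            · intro m hm
              exact ((r5 m (fun h => pvInT_disj hn hm h)).1).symm
            · intro m hm _
              exact ((r5 m (fun h => pvInT_disj hn hm h)).2).symm
          · exact r2
        · -- pvSeg preserved
          unfold pvSeg
          rw [hT0, hL0]
          have := pvPushDown_seg T L node s e
          unfold pvSeg at this
          linear_combination this - (e - s + 1) * hPL0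
        · -- pvVal preserved
          intro i
          rw [pvVal.eq_def, if_pos hlt, hL0, ← pvPushDown_val T L node s e i hn hse, hvalP i]
          by_cases hi : i ≤ pvMid s e
          · rw [if_pos hi, if_pos hi, hvalRl i, l4 i]; ring
          · rw [if_neg hi, if_neg hi, r4 i, hvalQr i]; ring
        · -- unchanged outside the subtree
          intro m hm
          have h1 := pvPushDown_unch (T := T) (L := L) (s := s) (e := e) hm
          have h2 := l5 m (fun h => hm (pvInT_left h))
          have h3 := r5 m (fun h => hm (pvInT_right h))
          rw [h3.1, h3.2, h2.1, h2.2, h1.1, h1.2]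
          exact ⟨rfl, rfl⟩

-- the fuel chosen by the wrappers always suffices
lemma pvUpdate_spec (T L : Nat → Int) (node : Nat) (s e l r v : Int) (hn : 1 ≤ node)
    (hG : pvGood T L node s e) :
    pvGood (pvUpdate T L node s e l r v).1 (pvUpdate T L node s e l r v).2 node s e
    ∧ (pvUpdate T L node s e l r v).2 node = 0
    ∧ pvSeg (pvUpdate T L node s e l r v).1 (pvUpdate T L node s e l r v).2 node s e
        = pvSeg T L node s e + (Finset.Icc s e).sum (fun i => if l ≤ i ∧ i ≤ r then v else 0)
    ∧ (∀ i, s ≤ i → i ≤ e →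
        pvVal (pvUpdate T L node s e l r v).1 (pvUpdate T L node s e l r v).2 node s e i
          = pvVal T L node s e i + (if l ≤ i ∧ i ≤ r then v else 0))
    ∧ (∀ m, ¬ pvInT node m → (pvUpdate T L node s e l r v).1 m = T m ∧ (pvUpdate T L node s e l r v).2 m = L m) := by
  unfold pvUpdate
  exact pvUpdateF_spec ((e - s).toNat + 1) T L node s e l r v hn hG (by omega)

lemma pvQuery_spec (T L : Nat → Int) (node : Nat) (s e l r : Int) (hn : 1 ≤ node)
    (hG : pvGood T L node s e) :
    (pvQuery T L node s e l r).1
      = (Finset.Icc s e).sum (fun i => if l ≤ i ∧ i ≤ r then pvVal T L node s e i else 0)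
    ∧ pvGood (pvQuery T L node s e l r).2.1 (pvQuery T L node s e l r).2.2 node s e
    ∧ pvSeg (pvQuery T L node s e l r).2.1 (pvQuery T L node s e l r).2.2 node s e = pvSeg T L node s e
    ∧ (∀ i, pvVal (pvQuery T L node s e l r).2.1 (pvQuery T L node s e l r).2.2 node s e i = pvVal T L node s e i)
    ∧ (∀ m, ¬ pvInT node m → (pvQuery T L node s e l r).2.1 m = T m ∧ (pvQuery T L node s e l r).2.2 m = L m) := by
  unfold pvQuery
  exact pvQueryF_spec ((e - s).toNat + 1) T L node s e l r hn hG (by omega)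

-- the reference array value determined by a list of past adds
def pvF (adds : List (Int × Int × Int)) (i : Int) : Int :=
  (adds.map (fun u => if u.1 ≤ i ∧ i ≤ u.2.1 then u.2.2 else 0)).sum

lemma pvGood_zero (node : Nat) (s e : Int) : pvGood (fun _ => 0) (fun _ => 0) node s e := by
  by_cases hse : s < e
  · rw [pvGood.eq_def, if_pos hse]
    exact ⟨by unfold pvSeg; ring, pvGood_zero _ _ _, pvGood_zero _ _ _⟩
  · rw [pvGood.eq_def, if_neg hse]; trivial
termination_by (e - s).toNat
decreasing_by
  all_goals have h2 : pvMid s e = (s + e) / 2 := PySem.Int.floordiv_eq_ediv_of_pos (by omega)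
  all_goals rw [h2]; omega

lemma pvVal_zero (node : Nat) (s e i : Int) : pvVal (fun _ => 0) (fun _ => 0) node s e i = 0 := by
  by_cases hse : s < e
  · rw [pvVal.eq_def, if_pos hse]
    by_cases hi : i ≤ pvMid s e
    · rw [if_pos hi, pvVal_zero]; ring
    · rw [if_neg hi, pvVal_zero]; ring
  · rw [pvVal.eq_def, if_neg hse]; ring
termination_by (e - s).toNat
decreasing_by
  all_goals have h2 : pvMid s e = (s + e) / 2 := PySem.Int.floordiv_eq_ediv_of_pos (by omega)
  all_goals rw [h2]; omega

-- one overlap term equals the indicator sum over the clamped range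
lemma pvOverlap_eq (lo hi a b x : Int) :
    (Finset.Icc lo hi).sum (fun i => if a ≤ i ∧ i ≤ b then x else 0) = pvOverlap lo hi (a, b, x) := by
  have hmem : ∀ i ∈ Finset.Icc lo hi,
      (if a ≤ i ∧ i ≤ b then x else 0) = if i ∈ Finset.Icc a b then x else 0 := by
    intro i _; simp [Finset.mem_Icc]
  rw [Finset.sum_congr rfl hmem, Finset.sum_ite_mem]
  have hset : Finset.Icc lo hi ∩ Finset.Icc a b = Finset.Icc (max a lo) (min b hi) := by
    ext i; simp only [Finset.mem_inter, Finset.mem_Icc]; omega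
  rw [hset, Finset.sum_const, Int.card_Icc, Int.nsmul_eq_mul]
  unfold pvOverlap
  simp only []
  by_cases hlen : min b hi - max a lo + 1 > 0
  · rw [if_pos hlen]
    have : ((min b hi + 1 - max a lo).toNat : Int) = min b hi - max a lo + 1 := by omega
    rw [this]; ring
  · rw [if_neg hlen]
    have : (min b hi + 1 - max a lo).toNat = 0 := by omega
    rw [this]; ring

-- B's fold equals the reference range sum
lemma pvFoldB_eq (adds : List (Int × Int × Int)) (lo hi : Int) :
    adds.foldl (fun acc u => acc + pvOverlap lo hi u) 0
      = (Finset.Icc lo hi).sum (fun i => pvF adds i) := by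
  rw [PySem.List.foldl_add adds (pvOverlap lo hi) 0, zero_add]
  induction adds with
  | nil => simp [pvF]
  | cons u rest ih =>
    simp only [List.map_cons, List.sum_cons, ih]
    have : ∀ i, pvF (u :: rest) i = (if u.1 ≤ i ∧ i ≤ u.2.1 then u.2.2 else 0) + pvF rest i := by
      intro i; simp [pvF]
    rw [Finset.sum_congr rfl (fun i _ => this i), Finset.sum_add_distrib, pvOverlap_eq]

-- clamping a guarded sum over [1,n] to the overlap interval
lemma pvClamp (b c n : Int) (f : Int → Int) :
    (Finset.Icc 1 n).sum (fun i => if b ≤ i ∧ i ≤ c then f i else 0)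
      = (Finset.Icc (max b 1) (min c n)).sum f := by
  have hmem : ∀ i ∈ Finset.Icc 1 n,
      (if b ≤ i ∧ i ≤ c then f i else 0) = if i ∈ Finset.Icc b c then f i else 0 := by
    intro i _; simp [Finset.mem_Icc]
  rw [Finset.sum_congr rfl hmem, Finset.sum_ite_mem]
  apply Finset.sum_congr _ (fun _ _ => rfl)
  ext i; simp only [Finset.mem_inter, Finset.mem_Icc]; omega

-- main loop invariant
lemma pvLoop_eq (n : Int) (qs : List (List Int)) (T L : Nat → Int) (adds : List (Int × Int × Int))
    (hok : ∀ q ∈ qs, pvQOk q = true)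
    (hG : pvGood T L 1 1 n)
    (hV : ∀ i, 1 ≤ i → i ≤ n → pvVal T L 1 1 n i = pvF adds i) :
    pvLoopA n qs T L = pvLoopB n qs adds := by
  induction qs generalizing T L adds with
  | nil => rfl
  | cons q rest ih =>
    have hq := hok q (List.mem_cons_self)
    have hok' : ∀ q ∈ rest, pvQOk q = true := fun q hq => hok q (List.mem_cons_of_mem _ hq)
    rcases q with _ | ⟨a, tl⟩
    · simp [pvQOk] at hq
    rcases tl with _ | ⟨b, tl⟩
    · simp [pvQOk] at hq
    rcases tl with _ | ⟨c, tl⟩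
    · simp [pvQOk] at hq
    rcases tl with _ | ⟨d, tl⟩
    · -- sum query [a, b, c] with a ≠ 0
      simp only [pvQOk, bne_iff_ne, ne_eq] at hq
      simp only [pvLoopA, pvLoopB, List.headD_cons, if_neg hq]
      have hQ := pvQuery_spec T L 1 1 n b c (le_refl 1) hG
      obtain ⟨q1, q2, _, q4, _⟩ := hQ
      congr 1
      · rw [q1]
        have hmem : ∀ i ∈ Finset.Icc (1 : Int) n,
            (if b ≤ i ∧ i ≤ c then pvVal T L 1 1 n i else 0)
              = if b ≤ i ∧ i ≤ c then pvF adds i else 0 := by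
          intro i hi; simp only [Finset.mem_Icc] at hi
          by_cases hbc : b ≤ i ∧ i ≤ c
          · rw [if_pos hbc, if_pos hbc, hV i hi.1 hi.2]
          · rw [if_neg hbc, if_neg hbc]
        rw [Finset.sum_congr rfl hmem, pvClamp, ← pvFoldB_eq]
      · exact ih _ _ _ hok' q2 (fun i h1 h2 => by rw [q4 i]; exact hV i h1 h2)
    rcases tl with _ | ⟨x, tl⟩
    · -- add query [a, b, c, d] with a = 0
      simp only [pvQOk, beq_iff_eq] at hq
      subst hq
      simp only [pvLoopA, pvLoopB, List.headD_cons]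
      have hU := pvUpdate_spec T L 1 1 n b c d (le_refl 1) hG
      obtain ⟨u1, _, _, u4, _⟩ := hU
      refine ih _ _ _ hok' u1 ?_
      intro i h1 h2
      rw [u4 i h1 h2, hV i h1 h2]
      simp [pvF]
    · simp [pvQOk] at hq

-- ===== VERDICT (by name: the statement is the Claim_ definition above) =====
theorem range_add_range_sum_spec : Claim_equal_range_add_range_sum := by
  intro n queries _ hPre
  unfold Spec_range_add_range_sum range_add_range_sum range_add_range_sum_alt
  exact pvLoop_eq n queries _ _ [] hPre.1 (pvGood_zero 1 1 n) (fun i _ _ => pvVal_zero 1 1 n i)
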